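-- pv_equiv track=rewrite | github.com/iero/BeatCrunch | beatcrunch/utils/similarity.py | freqDist
-- ===== SOURCE A (Python) =====
-- import operator
--
-- def freqDist(tokens):
--     dist={}
--     for t in tokens :
--         if len(t) == 1 : continue
--
--         if t in dist :
--             dist[t] += 1
--         else :
--             dist[t] = 1
--
--     out=[]
--     for (k,v) in sorted(dist.items(), key=operator.itemgetter(1), reverse=True) :
--         if v>1 : out.append(k)
--         # if v==1 : dist.pop(k)
--
--     return out
-- ===== SOURCE B (Python) =====
-- def freqDist(tokens):
--     dist = {}
--     for t in tokens:
--         if len(t) != 1: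
--             dist[t] = dist.get(t, 0) + 1
--     maxv = 0
--     for v in dist.values():
--         if v > maxv:
--             maxv = v
--     buckets = {}
--     for k, v in dist.items():
--         buckets.setdefault(v, []).append(k)
--     out = []
--     for c in range(maxv, 1, -1):
--         out.extend(buckets.get(c, []))
--     return out
-- ===== Notes on version B (the rewrite author's own statement) =====
-- stated objective: alternative
-- what changed: Replaces the comparison sort of dict items by a counting/bucket pass: tokens are grouped into per-count buckets in insertion order and emitted by iterating the count values from the maximum down to 2.
import Mathlib
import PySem

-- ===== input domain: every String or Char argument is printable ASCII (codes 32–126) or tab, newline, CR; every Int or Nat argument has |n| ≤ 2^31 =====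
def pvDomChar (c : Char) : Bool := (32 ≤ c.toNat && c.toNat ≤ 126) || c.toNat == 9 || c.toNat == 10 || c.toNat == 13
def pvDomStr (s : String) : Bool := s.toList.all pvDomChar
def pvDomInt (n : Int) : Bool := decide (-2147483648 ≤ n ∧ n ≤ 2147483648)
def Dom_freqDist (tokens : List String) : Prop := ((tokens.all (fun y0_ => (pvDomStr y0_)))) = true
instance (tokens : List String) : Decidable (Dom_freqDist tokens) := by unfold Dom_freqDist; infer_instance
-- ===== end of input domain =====

-- B replaces the comparison sort of the count dict by a counting/bucket pass (buckets filled in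
-- insertion order, emitted from the maximum count down to 2); same return value, alternative algorithm.

-- ===== PORT A =====
def freqDist (tokens : List String) : List String :=
  let dist := tokens.foldl (fun d t =>
      if PySem.Str.len t = 1 then d
      else if d.contains t then d.insert t (d.getD t 0 + 1) else d.insert t 1)
    (PySem.Dict.empty : PySem.Dict String Int)
  (PySem.List.sorted dist.items (fun p => p.2) true).foldl
    (fun out p => if p.2 > 1 then out ++ [p.1] else out) []

-- ===== PORT B =====
def freqDist_alt (tokens : List String) : List String :=
  let dist := tokens.foldl (fun d t =>
      if PySem.Str.len t ≠ 1 then d.insert t (d.getD t 0 + 1) else d)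
    (PySem.Dict.empty : PySem.Dict String Int)
  let maxv := dist.values.foldl (fun m v => if v > m then v else m) 0
  let buckets := dist.items.foldl (fun b p => b.modify p.2 [] (fun l => l ++ [p.1]))
    (PySem.Dict.empty : PySem.Dict Int (List String))
  (PySem.List.pyRange maxv 1 (-1)).foldl (fun out c => out ++ buckets.getD c []) []

-- ===== PRECONDITION & SPEC =====
def Spec_freqDist (tokens : List String) (out : List String) : Prop := out = freqDist_alt tokens
instance (tokens : List String) (out : List String) : Decidable (Spec_freqDist tokens out) := by unfold Spec_freqDist; infer_instance

-- ===== CLAIM (what is proved, stated in full; the proofs are below) =====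
def Claim_equal_freqDist : Prop := ∀ (tokens : List String), Dom_freqDist tokens → Spec_freqDist tokens (freqDist tokens)

-- ===== LEMMAS AND PROOFS =====

-- The two count-building loops are the same function.
lemma pv_dist_eq (tokens : List String) :
    tokens.foldl (fun d t =>
      if PySem.Str.len t = 1 then d
      else if d.contains t then d.insert t (d.getD t 0 + 1) else d.insert t 1)
      (PySem.Dict.empty : PySem.Dict String Int)
    = tokens.foldl (fun d t =>
      if PySem.Str.len t ≠ 1 then d.insert t (d.getD t 0 + 1) else d)
      (PySem.Dict.empty : PySem.Dict String Int) := by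
  congr 1
  funext d t
  by_cases h : PySem.Str.len t = 1
  · rw [if_pos h, if_neg (fun hh => hh h)]
  · rw [if_neg h, if_pos h]
    cases hc : d.contains t
    · simp [PySem.Dict.getD_of_not_contains d 0 hc]
    · simp

-- Every count in the dict is at least 1.
lemma pv_one_le_values (ts : List String) (d : PySem.Dict String Int)
    (h : ∀ p ∈ d.items, (1:Int) ≤ p.2) :
    ∀ p ∈ (ts.foldl (fun d t =>
      if PySem.Str.len t ≠ 1 then d.insert t (d.getD t 0 + 1) else d) d).items, (1:Int) ≤ p.2 := by
  induction ts generalizing d with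
  | nil => simpa using h
  | cons t ts ih =>
    simp only [List.foldl_cons]
    apply ih
    by_cases hl : PySem.Str.len t ≠ 1
    · rw [if_pos hl]
      intro p hp
      rcases (PySem.Dict.mem_items_insert d t (d.getD t 0 + 1) p).mp hp with he | ⟨hm, _⟩
      · have h0 : 0 ≤ d.getD t 0 := by
          rw [PySem.Dict.getD_eq_get?_getD]
          cases hk : d.get? t with
          | none => simp
          | some v =>
            have h1 := h _ (PySem.Dict.mem_items_of_get?_eq_some d hk)
            simp at h1 ⊢
            omega
        subst he
        show (1:Int) ≤ d.getD t 0 + 1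
        omega
      · exact h p hm
    · rw [if_neg hl]
      exact h

lemma pv_insertBy_append_of_false {α : Type} (before : α → α → Bool) (x : α) (B r : List α)
    (h : ∀ y ∈ B, before x y = false) :
    PySem.List.insertBy before x (B ++ r) = B ++ PySem.List.insertBy before x r := by
  induction B with
  | nil => simp
  | cons y B ih =>
    have hy := h y (List.mem_cons_self ..)
    simp only [List.cons_append, PySem.List.insertBy, hy, Bool.false_eq_true, if_false]
    rw [ih (fun z hz => h z (List.mem_cons_of_mem _ hz))]

lemma pv_insertBy_cons_of_true {α : Type} (before : α → α → Bool) (x : α) (r : List α)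
    (h : ∀ y ∈ r, before x y = true) :
    PySem.List.insertBy before x r = x :: r := by
  cases r with
  | nil => simp [PySem.List.insertBy]
  | cons y ys => simp [PySem.List.insertBy, h y (List.mem_cons_self ..)]

lemma pv_flatMap_congr {α β : Type} (l : List α) (f g : α → List β)
    (h : ∀ a ∈ l, f a = g a) : l.flatMap f = l.flatMap g := by
  induction l with
  | nil => rfl
  | cons a l ih =>
    simp only [List.flatMap_cons, h a (List.mem_cons_self ..),
      ih (fun b hb => h b (List.mem_cons_of_mem _ hb))]

-- Inserting one element into a descending bucket concatenation appends it at the end of its bucket.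
lemma pv_insertBy_buckets (cs : List Int) (hcs : cs.Pairwise (· > ·))
    (x : String × Int) (hx : x.2 ∈ cs) (l : List (String × Int)) :
    PySem.List.insertBy (fun a b => decide (b.2 < a.2)) x
      (cs.flatMap (fun c => l.filter (fun p => p.2 == c)))
    = cs.flatMap (fun c => (l ++ [x]).filter (fun p => p.2 == c)) := by
  induction cs with
  | nil => simp at hx
  | cons c cs ih =>
    rw [List.pairwise_cons] at hcs
    obtain ⟨hgt, hcs'⟩ := hcs
    simp only [List.flatMap_cons]
    by_cases hxc : x.2 = c
    · have hB : ∀ y ∈ l.filter (fun p => p.2 == c),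
          (fun (a b : String × Int) => decide (b.2 < a.2)) x y = false := by
        intro y hy
        have h2 := (List.mem_filter.mp hy).2
        simp only [beq_iff_eq] at h2
        simp only [h2, hxc, decide_eq_false_iff_not]
        omega
      rw [pv_insertBy_append_of_false _ _ _ _ hB]
      have hr : ∀ y ∈ cs.flatMap (fun c => l.filter (fun p => p.2 == c)),
          (fun (a b : String × Int) => decide (b.2 < a.2)) x y = true := by
        intro y hy
        obtain ⟨c', hc', hy'⟩ := List.mem_flatMap.mp hy
        have h2 := (List.mem_filter.mp hy').2
        simp only [beq_iff_eq] at h2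
        have h3 := hgt c' hc'
        simp only [h2, hxc, decide_eq_true_eq]
        omega
      rw [pv_insertBy_cons_of_true _ _ _ hr]
      have hrest : cs.flatMap (fun c' => (l ++ [x]).filter (fun p => p.2 == c'))
          = cs.flatMap (fun c' => l.filter (fun p => p.2 == c')) := by
        apply pv_flatMap_congr
        intro c' hc'
        rw [List.filter_append]
        have h3 := hgt c' hc'
        have hb : ((x.2 == c') : Bool) = false := by
          simp only [beq_eq_false_iff_ne, ne_eq]
          omega
        simp [hb]
      rw [hrest, List.filter_append]
      have hxf : ([x].filter (fun p => p.2 == c)) = [x] := by simp [hxc]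
      rw [hxf]
      simp
    · have hx' : x.2 ∈ cs := by
        rcases List.mem_cons.mp hx with h | h
        · exact absurd h hxc
        · exact h
      have hlt : x.2 < c := hgt _ hx'
      have hB : ∀ y ∈ l.filter (fun p => p.2 == c),
          (fun (a b : String × Int) => decide (b.2 < a.2)) x y = false := by
        intro y hy
        have h2 := (List.mem_filter.mp hy).2
        simp only [beq_iff_eq] at h2
        simp only [h2, decide_eq_false_iff_not]
        omega
      rw [pv_insertBy_append_of_false _ _ _ _ hB, ih hcs' hx']
      have hfe : ((l ++ [x]).filter (fun p => p.2 == c)) = l.filter (fun p => p.2 == c) := by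
        rw [List.filter_append]
        have hb : ((x.2 == c) : Bool) = false := by simp [hxc]
        simp [hb]
      rw [hfe]

-- Python's stable reverse sort on the count IS the bucket concatenation, for any strictly
-- descending list of count values covering the list.
lemma pv_sorted_buckets (l : List (String × Int)) (cs : List Int)
    (hcs : cs.Pairwise (· > ·)) (hcov : ∀ p ∈ l, p.2 ∈ cs) :
    PySem.List.sorted l (fun p => p.2) true
    = cs.flatMap (fun c => l.filter (fun p => p.2 == c)) := by
  revert hcov
  induction l using List.reverseRecOn with
  | nil => intro _; simp [PySem.List.sorted]
  | append_singleton l x ih =>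
    intro hcov
    rw [PySem.List.sorted_rev_eq_foldl_insertBy, List.foldl_append, List.foldl_cons, List.foldl_nil,
      ← PySem.List.sorted_rev_eq_foldl_insertBy,
      ih (fun p hp => hcov p (List.mem_append_left _ hp))]
    exact pv_insertBy_buckets cs hcs x (hcov x (by simp)) l

lemma pv_flatMap_range_trunc {β : Type} (g : Nat → List β) (m n : Nat) (hmn : m ≤ n)
    (h : ∀ k, m ≤ k → k < n → g k = []) :
    (List.range n).flatMap g = (List.range m).flatMap g := by
  induction n with
  | zero => interval_cases m; rfl
  | succ n ih =>
    rcases Nat.lt_or_ge m (n+1) with hlt | hge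
    · have hm : m ≤ n := by omega
      rw [List.range_succ, List.flatMap_append, ih hm (fun k hk1 hk2 => h k hk1 (by omega))]
      simp [h n hm (by omega)]
    · have : m = n + 1 := by omega
      subst this; rfl

lemma pv_pyRange_neg1 (a : Int) :
    PySem.List.pyRange a 1 (-1) = (List.range (a-1).toNat).map (fun (k : Nat) => a - (k:Int)) := by
  simp only [PySem.List.pyRange]
  rw [if_neg (by norm_num)]
  by_cases h : (1:Int) < a
  · rw [if_neg (by norm_num), if_pos h]
    have h1 : ((a - 1 + -(-1) - 1) / -(-1) : Int) = a - 1 := by norm_num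
    rw [h1]
    apply List.map_congr_left
    intro k _
    ring
  · rw [if_neg (by norm_num), if_neg h]
    have h0 : (a - 1).toNat = 0 := by omega
    rw [h0]
    rfl

lemma pv_max_fold (l : List Int) :
    l.foldl (fun m v => if v > m then v else m) 0 = l.foldl max 0 := by
  have : (fun (m v : Int) => if v > m then v else m) = max := by
    funext m v
    by_cases h : v > m
    · rw [if_pos h, max_eq_right h.le]
    · rw [if_neg h, max_eq_left (not_lt.mp h)]
  rw [this]

-- ===== VERDICT (by name: the statement is the Claim_ definition above) =====
theorem freqDist_spec : Claim_equal_freqDist := by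
  intro tokens _
  simp only [Spec_freqDist, freqDist, freqDist_alt]
  rw [pv_dist_eq]
  set d := tokens.foldl (fun d t =>
      if PySem.Str.len t ≠ 1 then d.insert t (d.getD t 0 + 1) else d)
    (PySem.Dict.empty : PySem.Dict String Int) with hd
  have hvals : ∀ p ∈ d.items, (1:Int) ≤ p.2 :=
    pv_one_le_values tokens _ (by intro p hp; simp [PySem.Dict.empty, PySem.Dict.items] at hp)
  set maxv := d.values.foldl (fun m v => if v > m then v else m) 0 with hmv
  have hmax := pv_max_fold d.values
  have h0 : (0:Int) ≤ maxv := by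
    rw [hmv, hmax]; exact (PySem.List.le_foldl_max d.values 0).1
  have hub : ∀ p ∈ d.items, p.2 ≤ maxv := by
    intro p hp
    rw [hmv, hmax]
    refine (PySem.List.le_foldl_max d.values 0).2 p.2 ?_
    simp only [PySem.Dict.values]
    exact List.mem_map.mpr ⟨p, hp, rfl⟩
  set cs : List Int := (List.range maxv.toNat).map (fun (k : Nat) => maxv - (k:Int)) with hcs_def
  have hcs : cs.Pairwise (· > ·) := by
    rw [hcs_def]
    exact List.Pairwise.map _ (fun a b hab => by omega) List.pairwise_lt_range
  have hcov : ∀ p ∈ d.items, p.2 ∈ cs := by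
    intro p hp
    have h1 := hvals p hp
    have h2 := hub p hp
    rw [hcs_def]
    exact List.mem_map.mpr ⟨(maxv - p.2).toNat, List.mem_range.mpr (by omega), by omega⟩
  -- A side: the append-if loop is filter-then-map over the sorted list
  have hA : (PySem.List.sorted d.items (fun p => p.2) true).foldl
        (fun out p => if p.2 > 1 then out ++ [p.1] else out) ([]:List String)
      = ((PySem.List.sorted d.items (fun p => p.2) true).filter
          (fun p => decide (p.2 > 1))).map (fun p => p.1) := by
    rw [show (fun (out : List String) (p : String × Int) => if p.2 > 1 then out ++ [p.1] else out)
        = (fun out p => if (fun (q : String × Int) => decide (q.2 > 1)) p = true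
            then out ++ [(fun (q : String × Int) => q.1) p] else out) from by
      funext out p; by_cases h : p.2 > 1 <;> simp [h]]
    rw [PySem.List.foldl_append_if]
    simp
  rw [hA, pv_sorted_buckets d.items cs hcs hcov, List.filter_flatMap, List.map_flatMap]
  have hAc : ∀ c ∈ cs,
      ((d.items.filter (fun p => p.2 == c)).filter (fun p => decide (p.2 > 1))).map
        (fun (p : String × Int) => p.1)
      = if 1 < c then (d.items.filter (fun p => p.2 == c)).map (fun (p : String × Int) => p.1)
        else [] := by
    intro c _
    by_cases hc : 1 < c
    · rw [if_pos hc]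
      congr 1
      refine List.filter_eq_self.mpr (fun a ha => ?_)
      have h2 := (List.mem_filter.mp ha).2
      simp only [beq_iff_eq] at h2
      simp only [decide_eq_true_eq]
      omega
    · rw [if_neg hc]
      rw [List.filter_eq_nil_iff.mpr, List.map_nil]
      intro a ha
      have h2 := (List.mem_filter.mp ha).2
      simp only [beq_iff_eq] at h2
      simp only [decide_eq_true_eq]
      omega
  rw [pv_flatMap_congr _ _ _ hAc, hcs_def, List.flatMap_map]
  -- B side
  rw [PySem.List.foldl_append_eq_flatMap, List.nil_append, pv_pyRange_neg1, List.flatMap_map]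
  have hbkt : ∀ c : Int,
      (d.items.foldl (fun b p => b.modify p.2 [] (fun l => l ++ [p.1]))
        (PySem.Dict.empty : PySem.Dict Int (List String))).getD c []
      = (d.items.filter (fun p => p.2 == c)).map (fun (p : String × Int) => p.1) := by
    intro c
    have h1 : d.items.foldl (fun b p => b.modify p.2 [] (fun l => l ++ [p.1]))
          (PySem.Dict.empty : PySem.Dict Int (List String))
        = (d.items.map Prod.swap).foldl (fun b q => b.modify q.1 [] (fun l => l ++ [q.2]))
          PySem.Dict.empty := by
      rw [List.foldl_map]
      rfl
    rw [h1, PySem.Dict.getD_foldl_modify_append, PySem.Dict.getD_empty, List.nil_append,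
      List.filter_map, List.map_map]
    rfl
  -- both sides are flatMaps over ranges of the same bucket function
  have htr : (List.range maxv.toNat).flatMap
        (fun (k : Nat) => if 1 < maxv - (k:Int)
          then (d.items.filter (fun p => p.2 == maxv - (k:Int))).map (fun (p : String × Int) => p.1)
          else [])
      = (List.range (maxv-1).toNat).flatMap
        (fun (k : Nat) => if 1 < maxv - (k:Int)
          then (d.items.filter (fun p => p.2 == maxv - (k:Int))).map (fun (p : String × Int) => p.1)
          else []) := by
    refine pv_flatMap_range_trunc _ _ _ (by omega) (fun k hk1 hk2 => ?_)
    rw [if_neg (by omega)]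
  rw [htr]
  refine pv_flatMap_congr _ _ _ (fun k hk => ?_)
  have hk' : k < (maxv-1).toNat := List.mem_range.mp hk
  rw [if_pos (by omega), hbkt]
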